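-- pv_equiv track=rewrite | github.com/Cgcharles7/OrientedGraphs | generate.py | build_directed_oriented_graph
-- ===== SOURCE A (Python) =====
-- def build_directed_oriented_graph(min_degree):
--     from itertools import combinations
--
--     def add_edges(graph, nodes):
--         # Connect each pair of nodes in the subset with directed edges
--         for i, j in combinations(nodes, 2):
--             graph[i][j] = 1  # Forward edge only
--
--     size = min_degree * (min_degree - 1) // 2 + min_degree  # Estimate the size of the graph
--     graph = [[0] * size for _ in range(size)]
--
--     current_node = 0
--     while current_node < size:
--         # Determine the number of new nodes
--         num_new_nodes = min_degree - 1
--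
--         if current_node + num_new_nodes >= size:
--             num_new_nodes = size - current_node - 1
--
--         new_nodes = list(range(current_node + 1, current_node + 1 + num_new_nodes))
--
--         # Connect the central node to new nodes
--         for node in new_nodes:
--             graph[current_node][node] = 1  # Oriented: only forward edge
--
--         # Fully connect new nodes to each other with oriented (one-way) directed edges
--         add_edges(graph, new_nodes)
--
--         current_node += num_new_nodes + 1
--
--     return graph
-- ===== SOURCE B (Python) =====
-- def build_directed_oriented_graph(min_degree):
--     size = min_degree * (min_degree + 1) // 2
--     return [[1 if i < j and i // min_degree == j // min_degree else 0
--              for j in range(size)]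
--             for i in range(size)]
-- ===== Notes on version B (the rewrite author's own statement) =====
-- stated objective: alternative
-- what changed: Replaces A's imperative construction (allocate a zero matrix, then a while loop with current_node pointer arithmetic mutating graph[i][j]=1 through two edge loops) by a direct closed-form build: each cell (i,j) is computed independently as 1 iff i<j and i//min_degree==j//min_degree (same contiguous block), via nested comprehensions with no mutation.
-- outside the precondition, e.g. on build_directed_oriented_graph(-2): A does not finish within the time limit, B returns [[0]]
import Mathlib
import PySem

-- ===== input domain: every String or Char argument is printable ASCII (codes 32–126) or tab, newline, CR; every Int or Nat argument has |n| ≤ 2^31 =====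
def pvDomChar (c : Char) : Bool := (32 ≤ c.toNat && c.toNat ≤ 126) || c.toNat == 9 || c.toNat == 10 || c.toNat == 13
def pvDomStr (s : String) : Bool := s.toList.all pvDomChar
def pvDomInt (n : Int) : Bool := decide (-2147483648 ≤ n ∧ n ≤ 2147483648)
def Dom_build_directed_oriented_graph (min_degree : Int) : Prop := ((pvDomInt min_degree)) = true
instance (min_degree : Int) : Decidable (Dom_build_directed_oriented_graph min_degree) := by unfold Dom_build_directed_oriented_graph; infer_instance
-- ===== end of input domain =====

-- B replaces A's mutating while-loop edge insertion by a closed-form per-cell formula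
-- (cell (i,j) = 1 iff i<j and i//min_degree == j//min_degree), built by nested comprehensions.

-- ===== PORT A =====
-- graph[i][j] = 1; on every admitted input the indices are nonnegative and in range, so .toNat is exact
def pvSetEdge (g : List (List Int)) (i j : Int) : List (List Int) :=
  g.modify i.toNat (fun row => row.set j.toNat 1)

-- itertools.combinations(l, 2) in list order
def pvCombos2 : List Int → List (Int × Int)
  | [] => []
  | x :: xs => xs.map (fun y => (x, y)) ++ pvCombos2 xs

-- A's add_edges helper
def pvAddEdges (g : List (List Int)) (nodes : List Int) : List (List Int) :=
  (pvCombos2 nodes).foldl (fun g p => pvSetEdge g p.1 p.2) g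

-- A's while loop; fuel = size.toNat suffices on Pre_ (then each iteration advances
-- current_node by at least 1); for min_degree ≤ -2 the Python loop never terminates
-- and those inputs are outside Pre_.
def pvALoop (min_degree size : Int) : Nat → Int → List (List Int) → List (List Int)
  | 0, _, g => g
  | fuel + 1, current, g =>
    if current < size then
      let num := if size ≤ current + (min_degree - 1) then size - current - 1 else min_degree - 1
      let new_nodes := PySem.List.pyRange (current + 1) (current + 1 + num) 1
      let g1 := new_nodes.foldl (fun g node => pvSetEdge g current node) g
      let g2 := pvAddEdges g1 new_nodes
      pvALoop min_degree size fuel (current + num + 1) g2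
    else g

def build_directed_oriented_graph (min_degree : Int) : List (List Int) :=
  let size := PySem.Int.floordiv (min_degree * (min_degree - 1)) 2 + min_degree
  let graph := List.replicate size.toNat (List.replicate size.toNat (0 : Int))
  pvALoop min_degree size size.toNat 0 graph

-- ===== PORT B =====
def build_directed_oriented_graph_alt (min_degree : Int) : List (List Int) :=
  let size := PySem.Int.floordiv (min_degree * (min_degree + 1)) 2
  (PySem.List.pyRange 0 size 1).map (fun i =>
    (PySem.List.pyRange 0 size 1).map (fun j =>
      if i < j ∧ PySem.Int.floordiv i min_degree = PySem.Int.floordiv j min_degree then 1 else 0))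

-- ===== PRECONDITION & SPEC =====
-- Pre_ excludes min_degree ≤ -2, on which A's while loop never terminates (current_node
-- decreases forever); A returns on every min_degree ≥ -1.
def Pre_build_directed_oriented_graph (min_degree : Int) : Prop := -1 ≤ min_degree
instance (min_degree : Int) : Decidable (Pre_build_directed_oriented_graph min_degree) := by unfold Pre_build_directed_oriented_graph; infer_instance
def pvWitness_build_directed_oriented_graph : Int := (3)

def Spec_build_directed_oriented_graph (min_degree : Int) (out : List (List Int)) : Prop := out = build_directed_oriented_graph_alt min_degree
instance (min_degree : Int) (out : List (List Int)) : Decidable (Spec_build_directed_oriented_graph min_degree out) := by unfold Spec_build_directed_oriented_graph; infer_instance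

-- ===== CLAIM (what is proved, stated in full; the proofs are below) =====
def Claim_equal_build_directed_oriented_graph : Prop := ∀ (min_degree : Int), Dom_build_directed_oriented_graph min_degree → Pre_build_directed_oriented_graph min_degree → Spec_build_directed_oriented_graph min_degree (build_directed_oriented_graph min_degree)

-- ===== LEMMAS AND PROOFS =====

-- matrix entry as a total function
def pvEntry (g : List (List Int)) (i j : Nat) : Int := (g.getD i []).getD j 0

-- rectangular shape
def pvShape (N : Nat) (g : List (List Int)) : Prop :=
  g.length = N ∧ ∀ i : Nat, i < N → (g.getD i []).length = N

-- all pairs A sets, expressed as one flat list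
def pvAllPairs (min_degree size : Int) : List (Int × Int) :=
  (PySem.List.pyRange 0 size min_degree).flatMap
    (fun s => pvCombos2 (PySem.List.pyRange (s + 1 - 1) (min (s + min_degree) size) 1))

theorem shape_setEdge {N : Nat} {g : List (List Int)} (hg : pvShape N g) (a b : Int) :
    pvShape N (pvSetEdge g a b) := by
  obtain ⟨h1, h2⟩ := hg
  refine ⟨by simpa [pvSetEdge] using h1, ?_⟩
  intro i hi
  have hilen : i < g.length := by rw [h1]; exact hi
  have hg2 := h2 i hi
  rw [List.getD_eq_getElem?_getD] at hg2 ⊢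
  show ((g.modify a.toNat (fun row => row.set b.toNat 1))[i]?.getD []).length = N
  rw [List.getElem?_modify, List.getElem?_eq_getElem hilen]
  rw [List.getElem?_eq_getElem hilen] at hg2
  by_cases hni : a.toNat = i <;> simp [hni, List.length_set] <;> simpa using hg2

theorem entry_setEdge {N : Nat} {g : List (List Int)} (hg : pvShape N g) {a b : Int}
    (ha : 0 ≤ a) (ha' : a.toNat < N) (hb : 0 ≤ b) (hb' : b.toNat < N) (i j : Nat) :
    pvEntry (pvSetEdge g a b) i j =
      if a = (i : Int) ∧ b = (j : Int) then 1 else pvEntry g i j := by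
  obtain ⟨h1, h2⟩ := hg
  unfold pvEntry pvSetEdge
  simp only [List.getD_eq_getElem?_getD]
  rw [List.getElem?_modify]
  by_cases hi : i < g.length
  · have hrow : (g[i]).length = N := by
      have := h2 i (h1 ▸ hi)
      rwa [List.getD_eq_getElem?_getD, List.getElem?_eq_getElem hi] at this
    rw [List.getElem?_eq_getElem hi]
    simp only [Option.map_eq_map, Option.map_some, Option.getD_some]
    by_cases hai : a.toNat = i
    · rw [if_pos hai, List.getElem?_set]
      by_cases hbj : b.toNat = j
      · rw [if_pos hbj, if_pos (by rw [hrow]; omega),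
          if_pos ⟨by omega, by omega⟩]
        rfl
      · rw [if_neg hbj, if_neg (by rintro ⟨-, h⟩; omega)]
    · rw [if_neg hai, if_neg (by rintro ⟨h, -⟩; omega)]
  · have hin : g[i]? = none := List.getElem?_eq_none (by omega)
    rw [hin]
    simp only [Option.map_eq_map, Option.map_none, Option.getD_none]
    rw [if_neg (by rintro ⟨h, -⟩; rw [h1] at hi; omega)]

theorem shape_foldl {N : Nat} (ps : List (Int × Int)) {g : List (List Int)} (hg : pvShape N g) :
    pvShape N (ps.foldl (fun g p => pvSetEdge g p.1 p.2) g) := by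
  induction ps generalizing g with
  | nil => exact hg
  | cons p ps ih => exact ih (shape_setEdge hg p.1 p.2)

theorem entry_foldl {N : Nat} (ps : List (Int × Int))
    (hps : ∀ p ∈ ps, 0 ≤ p.1 ∧ p.1.toNat < N ∧ 0 ≤ p.2 ∧ p.2.toNat < N)
    {g : List (List Int)} (hg : pvShape N g) (i j : Nat) :
    pvEntry (ps.foldl (fun g p => pvSetEdge g p.1 p.2) g) i j =
      if ((i : Int), (j : Int)) ∈ ps then 1 else pvEntry g i j := by
  induction ps generalizing g with
  | nil => simp
  | cons p ps ih =>
    have hp := hps p (by simp)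
    rw [List.foldl_cons, ih (fun q hq => hps q (by simp [hq])) (shape_setEdge hg p.1 p.2),
      entry_setEdge hg hp.1 hp.2.1 hp.2.2.1 hp.2.2.2]
    by_cases hmem : ((i : Int), (j : Int)) ∈ ps
    · simp [hmem]
    · by_cases hpe : p = ((i : Int), (j : Int))
      · subst hpe; simp [hmem]
      · have : ¬ (p.1 = (i : Int) ∧ p.2 = (j : Int)) := by
          intro h; exact hpe (Prod.ext h.1 h.2)
        have hnc : ((i : Int), (j : Int)) ∉ p :: ps := by
          simp only [List.mem_cons]
          rintro (h | h)
          · exact hpe h.symm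
          · exact hmem h
        rw [if_neg this, if_neg hnc, if_neg hmem]

theorem mem_combos2_pyRange {lo hi a b : Int} :
    (a, b) ∈ pvCombos2 (PySem.List.pyRange lo hi 1) ↔ lo ≤ a ∧ a < b ∧ b < hi := by
  have key : ∀ (n : Nat) (lo : Int), (hi - lo).toNat = n →
      ((a, b) ∈ pvCombos2 (PySem.List.pyRange lo hi 1) ↔ lo ≤ a ∧ a < b ∧ b < hi) := by
    intro n
    induction n with
    | zero =>
      intro lo hn
      rw [PySem.List.pyRange_one_eq_nil (by omega)]
      simp only [pvCombos2, List.not_mem_nil, false_iff]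
      omega
    | succ n ih =>
      intro lo hn
      rw [PySem.List.pyRange_one_cons (by omega)]
      simp only [pvCombos2, List.mem_append, List.mem_map, PySem.List.mem_pyRange_one,
        Prod.mk.injEq, ih (lo + 1) (by omega)]
      constructor
      · rintro (⟨y, hy, h1, h2⟩ | h) <;> omega
      · intro h
        by_cases hea : a = lo
        · exact Or.inl ⟨b, by omega, hea.symm, rfl⟩
        · exact Or.inr (by omega)
  exact key (hi - lo).toNat lo rfl

-- A's loop equals a fold of per-block fills over range(0, size, min_degree)
def pvBlockFill (size min_degree : Int) (g : List (List Int)) (start : Int) : List (List Int) :=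
  (pvCombos2 (PySem.List.pyRange (start + 1 - 1) (min (start + min_degree) size) 1)).foldl
    (fun g p => pvSetEdge g p.1 p.2) g

theorem pyRange_pos_nil {a b s : Int} (hab : b ≤ a) (hs : 0 < s) :
    PySem.List.pyRange a b s = [] := by
  rw [PySem.List.pyRange_of_pos _ _ hs, if_neg (by omega)]
  simp

theorem pyRange_pos_cons {a b s : Int} (hab : a < b) (hs : 0 < s) :
    PySem.List.pyRange a b s = a :: PySem.List.pyRange (a + s) b s := by
  rw [PySem.List.pyRange_of_pos _ _ hs, PySem.List.pyRange_of_pos _ _ hs]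
  have h1 : b - a + s - 1 = (b - a - 1) + 1 * s := by ring
  have hq0 : 0 ≤ (b - a - 1) / s := Int.ediv_nonneg (by omega) (le_of_lt hs)
  rw [if_pos hab, h1, Int.add_mul_ediv_right _ _ (by omega : s ≠ 0)]
  have h2 : ((b - a - 1) / s + 1).toNat = ((b - a - 1) / s).toNat + 1 := by omega
  rw [h2, List.range_succ_eq_map, List.map_cons, List.map_map]
  by_cases h3 : a + s < b
  · rw [if_pos h3]
    have h4 : b - (a + s) + s - 1 = b - a - 1 := by ring
    rw [h4]
    simp only [Nat.cast_zero, mul_zero, add_zero, List.cons.injEq, true_and]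
    apply List.map_congr_left
    intro k _
    simp only [Function.comp_apply]
    push_cast
    ring
  · rw [if_neg h3]
    have hz : (b - a - 1) / s = 0 := Int.ediv_eq_zero_of_lt (by omega) (by omega)
    rw [hz]
    simp

theorem block_eq (min_degree size current : Int) (g : List (List Int))
    (hmd : 1 ≤ min_degree) (hcur : current < size) :
    pvBlockFill size min_degree g current =
      (let num := if size ≤ current + (min_degree - 1) then size - current - 1 else min_degree - 1
       let new_nodes := PySem.List.pyRange (current + 1) (current + 1 + num) 1
       pvAddEdges (new_nodes.foldl (fun g node => pvSetEdge g current node) g) new_nodes) := by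
  have hnum : current + 1 + (if size ≤ current + (min_degree - 1) then size - current - 1 else min_degree - 1)
      = min (current + min_degree) size := by
    split_ifs with h <;> omega
  have hlt : current < min (current + min_degree) size := by omega
  simp only [pvBlockFill, show current + 1 - 1 = current from by ring, ← hnum]
  rw [PySem.List.pyRange_one_cons (by omega)]
  simp [pvCombos2, pvAddEdges, List.foldl_append, List.foldl_map]

theorem loop_eq (min_degree size : Int) (hmd : 1 ≤ min_degree) :
    ∀ (fuel : Nat) (current : Int) (g : List (List Int)),
      (size - current).toNat ≤ fuel →
      pvALoop min_degree size fuel current g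
        = (PySem.List.pyRange current size min_degree).foldl (pvBlockFill size min_degree) g := by
  intro fuel
  induction fuel with
  | zero =>
    intro current g hf
    rw [pyRange_pos_nil (by omega) (by omega)]
    simp [pvALoop]
  | succ n ih =>
    intro current g hf
    by_cases hc : current < size
    · rw [pyRange_pos_cons hc (by omega : (0:Int) < min_degree), List.foldl_cons,
        block_eq min_degree size current g hmd hc]
      simp only [pvALoop, if_pos hc]
      have htail : PySem.List.pyRange (current + min_degree) size min_degree
          = PySem.List.pyRange
              (current + (if size ≤ current + (min_degree - 1) then size - current - 1 else min_degree - 1) + 1)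
              size min_degree := by
        split_ifs with h
        · rw [pyRange_pos_nil (by omega) (by omega), pyRange_pos_nil (by omega) (by omega)]
        · rw [show current + (min_degree - 1) + 1 = current + min_degree from by ring]
      rw [htail]
      exact ih _ _ (by split_ifs with h <;> omega)
    · rw [pyRange_pos_nil (by omega) (by omega)]
      simp [pvALoop, hc]

theorem ediv_eq_of_between {md k x : Int} (hmd : 0 < md) (h1 : md * k ≤ x)
    (h2 : x < md * k + md) : x / md = k := by
  rw [show x = (x - md * k) + k * md from by ring,
    Int.add_mul_ediv_right _ _ (by omega : md ≠ 0),
    Int.ediv_eq_zero_of_lt (by omega) (by omega)]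
  simp

theorem allPairs_bounds {min_degree size : Int} (hmd : 1 ≤ min_degree) :
    ∀ p ∈ pvAllPairs min_degree size,
      0 ≤ p.1 ∧ p.1.toNat < size.toNat ∧ 0 ≤ p.2 ∧ p.2.toNat < size.toNat := by
  rintro ⟨a, b⟩ hp
  simp only [pvAllPairs, List.mem_flatMap] at hp
  obtain ⟨s, hs, hab⟩ := hp
  rw [PySem.List.mem_pyRange_iff_of_pos (by omega)] at hs
  rw [mem_combos2_pyRange] at hab
  simp only
  omega

theorem mem_allPairs {min_degree size : Int} (hmd : 1 ≤ min_degree) {a b : Int}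
    (ha : 0 ≤ a) (hb' : b < size) :
    ((a, b) ∈ pvAllPairs min_degree size ↔
      a < b ∧ a / min_degree = b / min_degree) := by
  have hmd0 : (0 : Int) < min_degree := by omega
  simp only [pvAllPairs, List.mem_flatMap]
  constructor
  · rintro ⟨s, hs, hab⟩
    rw [PySem.List.mem_pyRange_iff_of_pos hmd0] at hs
    rw [mem_combos2_pyRange] at hab
    obtain ⟨hs0, hssz, k, hk⟩ := hs
    rw [show s - 0 = s from by ring] at hk
    refine ⟨by omega, ?_⟩
    rw [ediv_eq_of_between hmd0 (k := k) (by omega) (by omega),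
      ediv_eq_of_between hmd0 (k := k) (by omega) (by omega)]
  · rintro ⟨hab, hq⟩
    have ea := Int.emod_def a min_degree
    have na := Int.emod_nonneg a (by omega : min_degree ≠ 0)
    have la := Int.emod_lt_of_pos a hmd0
    have eb := Int.emod_def b min_degree
    have nb := Int.emod_nonneg b (by omega : min_degree ≠ 0)
    have lb := Int.emod_lt_of_pos b hmd0
    refine ⟨min_degree * (a / min_degree), ?_, ?_⟩
    · rw [PySem.List.mem_pyRange_iff_of_pos hmd0]
      refine ⟨by nlinarith [Int.ediv_nonneg ha (le_of_lt hmd0)], by linarith, ⟨a / min_degree, by ring⟩⟩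
    · rw [mem_combos2_pyRange]
      refine ⟨by linarith, hab, ?_⟩
      rw [hq]
      exact lt_min (by linarith) hb'

theorem entry_eq_getElem (g : List (List Int)) (i j : Nat) (hi : i < g.length)
    (hj : j < (g[i]'hi).length) : pvEntry g i j = (g[i]'hi)[j]'hj := by
  unfold pvEntry
  simp only [List.getD_eq_getElem?_getD]
  rw [List.getElem?_eq_getElem hi]
  simp only [Option.getD_some]
  rw [List.getElem?_eq_getElem hj]
  rfl

theorem shape_replicate (n : Nat) : pvShape n (List.replicate n (List.replicate n (0 : Int))) := by
  refine ⟨List.length_replicate, ?_⟩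
  intro i hi
  rw [List.getD_eq_getElem?_getD, List.getElem?_replicate, if_pos hi, Option.getD_some,
    List.length_replicate]

theorem entry_replicate (n : Nat) (i j : Nat) :
    pvEntry (List.replicate n (List.replicate n (0 : Int))) i j = 0 := by
  unfold pvEntry
  simp only [List.getD_eq_getElem?_getD]
  rw [List.getElem?_replicate]
  by_cases hi : i < n
  · rw [if_pos hi, Option.getD_some, List.getElem?_replicate]
    by_cases hj : j < n
    · rw [if_pos hj, Option.getD_some]
    · rw [if_neg hj]; rfl
  · rw [if_neg hi]; rfl

-- ===== VERDICT (by name: the statement is the Claim_ definition above) =====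
theorem build_directed_oriented_graph_spec : Claim_equal_build_directed_oriented_graph := by
  intro md _ hPre
  unfold Spec_build_directed_oriented_graph
  unfold Pre_build_directed_oriented_graph at hPre
  rcases (by omega : md = -1 ∨ md = 0 ∨ 1 ≤ md) with h | h | h
  · subst h; decide
  · subst h; decide
  · have hmd0 : (0 : Int) < md := by omega
    have hdiv0 : 0 ≤ PySem.Int.floordiv (md * (md - 1)) 2 := by
      rw [PySem.Int.floordiv_eq_ediv_of_pos (by norm_num)]
      exact Int.ediv_nonneg (mul_nonneg (by omega) (by omega)) (by norm_num)
    set sz : Int := PySem.Int.floordiv (md * (md - 1)) 2 + md with hszdef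
    have hsz1 : 1 ≤ sz := by omega
    have hsizes : PySem.Int.floordiv (md * (md + 1)) 2 = sz := by
      rw [hszdef, PySem.Int.floordiv_eq_ediv_of_pos (by norm_num),
        PySem.Int.floordiv_eq_ediv_of_pos (by norm_num),
        show md * (md + 1) = md * (md - 1) + md * 2 from by ring,
        Int.add_mul_ediv_right _ _ (by norm_num : (2:Int) ≠ 0)]
    set n : Nat := sz.toNat with hndef
    set g0 : List (List Int) := List.replicate n (List.replicate n (0 : Int)) with hg0def
    have hg0 : pvShape n g0 := shape_replicate n
    -- A's result as a flat fold of edge sets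
    have hA : build_directed_oriented_graph md
        = (pvAllPairs md sz).foldl (fun g p => pvSetEdge g p.1 p.2) g0 := by
      show pvALoop md sz sz.toNat 0 g0 = _
      rw [loop_eq md sz h sz.toNat 0 g0 (by omega), pvAllPairs, List.foldl_flatMap]
      rfl
    have hshape : pvShape n (build_directed_oriented_graph md) := by
      rw [hA]; exact shape_foldl _ hg0
    have hEntry : ∀ i j : Nat, i < n → j < n →
        pvEntry (build_directed_oriented_graph md) i j
          = if (i : Int) < (j : Int) ∧ (i : Int) / md = (j : Int) / md then 1 else 0 := by
      intro i j hi hj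
      rw [hA, entry_foldl _ (allPairs_bounds h) hg0 i j, entry_replicate]
      simp only [mem_allPairs h (by omega : (0:Int) ≤ (i : Int)) (by omega : (j : Int) < sz)]
    -- B's result, row by row
    have hBalt : build_directed_oriented_graph_alt md
        = (PySem.List.pyRange 0 sz 1).map (fun ii =>
            (PySem.List.pyRange 0 sz 1).map (fun jj =>
              if ii < jj ∧ PySem.Int.floordiv ii md = PySem.Int.floordiv jj md
              then 1 else 0)) := by
      simp only [build_directed_oriented_graph_alt, hsizes]
    rw [hBalt, List.ext_getElem_iff]
    refine ⟨by rw [hshape.1, List.length_map, PySem.List.length_pyRange_one]; omega, ?_⟩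
    intro i hi hi'
    have hin : i < n := by rw [hshape.1] at hi; exact hi
    have hrowA : ((build_directed_oriented_graph md)[i]'hi).length = n := by
      have := hshape.2 i hin
      rwa [List.getD_eq_getElem?_getD, List.getElem?_eq_getElem hi, Option.getD_some] at this
    rw [List.getElem_map, PySem.List.getElem_pyRange_one, List.ext_getElem_iff]
    refine ⟨by rw [hrowA, List.length_map, PySem.List.length_pyRange_one]; omega, ?_⟩
    intro j hj hj'
    have hjn : j < n := by rw [hrowA] at hj; exact hj
    rw [List.getElem_map, PySem.List.getElem_pyRange_one,
      ← entry_eq_getElem _ i j hi hj, hEntry i j hin hjn]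
    simp only [zero_add, PySem.Int.floordiv_eq_ediv_of_pos hmd0]
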